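-- pv_equiv track=rewrite | github.com/WorldOfGZ/myastroboard | scripts/analyse_catalogues.py | is_type_compatible
-- ===== SOURCE A (Python) =====
-- def is_type_compatible(type_left: str, type_right: str) -> bool:
--     """Fuzzy matching for celestial object types."""
--     if not type_left or not type_right: return True
--     t1, t2 = type_left.lower(), type_right.lower()
--     if t1 == t2: return True
--     categories = {
--         'galaxy': ['galaxy', 'spiral', 'elliptical', 'lenticular', 'duo', 'pair'],
--         'cluster': ['cluster', 'open', 'globular', 'cl+n'],
--         'nebula': ['nebula', 'hii', 'reflection', 'emission', 'planetary', 'dark', 'remnant'],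
--         'star': ['star', 'double', 'triple', 'asterism', '*']
--     }
--     for cat_list in categories.values():
--         if any(kw in t1 for kw in cat_list) and any(kw in t2 for kw in cat_list):
--             return True
--     return False
-- ===== SOURCE B (Python) =====
-- def is_type_compatible(type_left: str, type_right: str) -> bool:
--     """Fuzzy matching for celestial object types."""
--     if not type_left or not type_right:
--         return True
--     t1, t2 = type_left.lower(), type_right.lower()
--     if t1 == t2:
--         return True
--     # flat keyword -> category-bit table; one pass accumulates a category
--     # bitmask per string, then test whether the masks share a bit
--     kw_bits = [
--         ('galaxy', 1), ('spiral', 1), ('elliptical', 1), ('lenticular', 1), ('duo', 1), ('pair', 1),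
--         ('cluster', 2), ('open', 2), ('globular', 2), ('cl+n', 2),
--         ('nebula', 4), ('hii', 4), ('reflection', 4), ('emission', 4), ('planetary', 4), ('dark', 4), ('remnant', 4),
--         ('star', 8), ('double', 8), ('triple', 8), ('asterism', 8), ('*', 8),
--     ]
--     m1 = m2 = 0
--     for kw, bit in kw_bits:
--         if kw in t1:
--             m1 |= bit
--         if kw in t2:
--             m2 |= bit
--     return (m1 & m2) != 0
-- ===== Notes on version B (the rewrite author's own statement) =====
-- stated objective: alternative
-- what changed: Replaced A's per-category loop of paired short-circuiting any-checks over a dict of keyword lists with a single pass over a flat keyword-to-category-bit table that accumulates one category bitmask per string, returning whether the two bitmasks share a bit.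
import Mathlib
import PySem

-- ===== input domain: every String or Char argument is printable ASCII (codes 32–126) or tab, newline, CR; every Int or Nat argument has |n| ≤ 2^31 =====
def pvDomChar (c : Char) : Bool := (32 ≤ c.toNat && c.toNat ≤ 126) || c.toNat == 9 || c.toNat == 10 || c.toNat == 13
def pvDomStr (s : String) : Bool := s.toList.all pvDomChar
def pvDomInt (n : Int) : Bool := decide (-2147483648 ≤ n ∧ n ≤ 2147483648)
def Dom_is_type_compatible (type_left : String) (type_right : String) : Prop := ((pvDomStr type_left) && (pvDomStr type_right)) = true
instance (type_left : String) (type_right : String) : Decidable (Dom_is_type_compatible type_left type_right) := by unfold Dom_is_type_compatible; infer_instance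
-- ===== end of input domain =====

-- B replaces A's per-category loop of paired short-circuiting any-checks with one pass over a
-- flat keyword→category-bit table accumulating a bitmask per string (objective: alternative).

-- ===== PORT A =====
-- A's categories dict (insertion order), as an association list per the type convention.
def pvCategories : List (String × List String) :=
  [("galaxy", ["galaxy", "spiral", "elliptical", "lenticular", "duo", "pair"]),
   ("cluster", ["cluster", "open", "globular", "cl+n"]),
   ("nebula", ["nebula", "hii", "reflection", "emission", "planetary", "dark", "remnant"]),
   ("star", ["star", "double", "triple", "asterism", "*"])]

-- 'for cat_list in categories.values(): if … : return True' / 'return False'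
def pvLoopA (t1 t2 : String) : List (List String) → Bool
  | [] => false
  | kws :: rest =>
    if (kws.any (fun kw => PySem.Str.isIn kw t1)) && (kws.any (fun kw => PySem.Str.isIn kw t2)) then
      true
    else pvLoopA t1 t2 rest

def is_type_compatible (type_left : String) (type_right : String) : Bool :=
  if type_left == "" || type_right == "" then true
  else
    let t1 := PySem.Str.lower type_left
    let t2 := PySem.Str.lower type_right
    if t1 == t2 then true
    else pvLoopA t1 t2 (pvCategories.map (·.2))

-- ===== PORT B =====
-- B's flat keyword → category-bit table (literal from Source B).
def pvKwBits : List (String × Nat) :=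
  [("galaxy", 1), ("spiral", 1), ("elliptical", 1), ("lenticular", 1), ("duo", 1), ("pair", 1),
   ("cluster", 2), ("open", 2), ("globular", 2), ("cl+n", 2),
   ("nebula", 4), ("hii", 4), ("reflection", 4), ("emission", 4), ("planetary", 4), ("dark", 4), ("remnant", 4),
   ("star", 8), ("double", 8), ("triple", 8), ("asterism", 8), ("*", 8)]

def is_type_compatible_alt (type_left : String) (type_right : String) : Bool :=
  if type_left == "" || type_right == "" then true
  else
    let t1 := PySem.Str.lower type_left
    let t2 := PySem.Str.lower type_right
    if t1 == t2 then true
    else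
      -- 'm1 = m2 = 0; for kw, bit in kw_bits: …'
      let p := pvKwBits.foldl (fun (p : Nat × Nat) kb =>
        (if PySem.Str.isIn kb.1 t1 then p.1 ||| kb.2 else p.1,
         if PySem.Str.isIn kb.1 t2 then p.2 ||| kb.2 else p.2)) (0, 0)
      decide (p.1 &&& p.2 ≠ 0)

-- ===== PRECONDITION & SPEC =====
def Spec_is_type_compatible (type_left : String) (type_right : String) (out : Bool) : Prop := out = is_type_compatible_alt type_left type_right
instance (type_left : String) (type_right : String) (out : Bool) : Decidable (Spec_is_type_compatible type_left type_right out) := by unfold Spec_is_type_compatible; infer_instance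

-- ===== CLAIM (what is proved, stated in full; the proofs are below) =====
def Claim_equal_is_type_compatible : Prop := ∀ (type_left : String) (type_right : String), Dom_is_type_compatible type_left type_right → Spec_is_type_compatible type_left type_right (is_type_compatible type_left type_right)

-- ===== LEMMAS AND PROOFS =====

-- The pair fold updates its two components independently, so it splits into two folds.
theorem pv_pair_fold (l : List (String × Nat)) (t1 t2 : String) (m1 m2 : Nat) :
    l.foldl (fun (p : Nat × Nat) kb =>
        (if PySem.Str.isIn kb.1 t1 then p.1 ||| kb.2 else p.1,
         if PySem.Str.isIn kb.1 t2 then p.2 ||| kb.2 else p.2)) (m1, m2)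
    = (l.foldl (fun m kb => if PySem.Str.isIn kb.1 t1 then m ||| kb.2 else m) m1,
       l.foldl (fun m kb => if PySem.Str.isIn kb.1 t2 then m ||| kb.2 else m) m2) := by
  induction l generalizing m1 m2 with
  | nil => rfl
  | cons kb rest ih =>
    rw [List.foldl_cons, List.foldl_cons, List.foldl_cons]
    exact ih _ _

-- Folding one category's block (all keywords carrying the same bit b) just or's b in
-- exactly when some keyword of the block occurs in t.
theorem pv_block_fold (kws : List String) (b : Nat) (t : String) (m : Nat) :
    (kws.map (fun kw => (kw, b))).foldl
        (fun m kb => if PySem.Str.isIn kb.1 t then m ||| kb.2 else m) m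
    = m ||| (if kws.any (fun kw => PySem.Str.isIn kw t) then b else 0) := by
  induction kws generalizing m with
  | nil => simp
  | cons kw rest ih =>
    rw [List.map_cons, List.foldl_cons, List.any_cons, ih]
    dsimp only
    by_cases h : PySem.Str.isIn kw t = true
    · rw [h]
      by_cases h2 : (rest.any fun kw => PySem.Str.isIn kw t) = true
      · rw [h2]; simp
      · rw [Bool.not_eq_true] at h2; rw [h2]; simp
    · rw [Bool.not_eq_true] at h; rw [h]; simp

-- The one-string fold over the whole flat table, as a function of the four per-category anys.
theorem pv_mask (t : String) :
    pvKwBits.foldl (fun m kb => if PySem.Str.isIn kb.1 t then m ||| kb.2 else m) 0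
    = ((0 ||| (if (["galaxy", "spiral", "elliptical", "lenticular", "duo", "pair"].any (fun kw => PySem.Str.isIn kw t)) then 1 else 0))
        ||| (if (["cluster", "open", "globular", "cl+n"].any (fun kw => PySem.Str.isIn kw t)) then 2 else 0))
        ||| (if (["nebula", "hii", "reflection", "emission", "planetary", "dark", "remnant"].any (fun kw => PySem.Str.isIn kw t)) then 4 else 0)
        ||| (if (["star", "double", "triple", "asterism", "*"].any (fun kw => PySem.Str.isIn kw t)) then 8 else 0) := by
  have h : pvKwBits =
      (["galaxy", "spiral", "elliptical", "lenticular", "duo", "pair"].map (fun kw => (kw, 1)))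
      ++ (["cluster", "open", "globular", "cl+n"].map (fun kw => (kw, 2)))
      ++ (["nebula", "hii", "reflection", "emission", "planetary", "dark", "remnant"].map (fun kw => (kw, 4)))
      ++ (["star", "double", "triple", "asterism", "*"].map (fun kw => (kw, 8))) := by rfl
  rw [h, List.foldl_append, List.foldl_append, List.foldl_append,
      pv_block_fold, pv_block_fold, pv_block_fold, pv_block_fold]

-- After the two shared guards, both programs are Boolean functions of the eight
-- per-category membership tests; generalize those and check all 256 cases.
theorem pv_core (t1 t2 : String) :
    pvLoopA t1 t2 (pvCategories.map (·.2)) =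
      decide ((pvKwBits.foldl (fun (p : Nat × Nat) kb =>
          (if PySem.Str.isIn kb.1 t1 then p.1 ||| kb.2 else p.1,
           if PySem.Str.isIn kb.1 t2 then p.2 ||| kb.2 else p.2)) (0, 0)).1 &&&
        (pvKwBits.foldl (fun (p : Nat × Nat) kb =>
          (if PySem.Str.isIn kb.1 t1 then p.1 ||| kb.2 else p.1,
           if PySem.Str.isIn kb.1 t2 then p.2 ||| kb.2 else p.2)) (0, 0)).2 ≠ 0) := by
  rw [pv_pair_fold, pv_mask t1, pv_mask t2]
  simp only [pvCategories, List.map, pvLoopA]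
  generalize (List.any ["galaxy", "spiral", "elliptical", "lenticular", "duo", "pair"] (fun kw => PySem.Str.isIn kw t1)) = a1
  generalize (List.any ["cluster", "open", "globular", "cl+n"] (fun kw => PySem.Str.isIn kw t1)) = a2
  generalize (List.any ["nebula", "hii", "reflection", "emission", "planetary", "dark", "remnant"] (fun kw => PySem.Str.isIn kw t1)) = a3
  generalize (List.any ["star", "double", "triple", "asterism", "*"] (fun kw => PySem.Str.isIn kw t1)) = a4
  generalize (List.any ["galaxy", "spiral", "elliptical", "lenticular", "duo", "pair"] (fun kw => PySem.Str.isIn kw t2)) = b1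
  generalize (List.any ["cluster", "open", "globular", "cl+n"] (fun kw => PySem.Str.isIn kw t2)) = b2
  generalize (List.any ["nebula", "hii", "reflection", "emission", "planetary", "dark", "remnant"] (fun kw => PySem.Str.isIn kw t2)) = b3
  generalize (List.any ["star", "double", "triple", "asterism", "*"] (fun kw => PySem.Str.isIn kw t2)) = b4
  revert a1 a2 a3 a4 b1 b2 b3 b4
  decide

-- ===== VERDICT (by name: the statement is the Claim_ definition above) =====
theorem is_type_compatible_spec : Claim_equal_is_type_compatible := by
  intro type_left type_right _
  unfold Spec_is_type_compatible is_type_compatible is_type_compatible_alt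
  dsimp only
  split
  · rfl
  · split
    · rfl
    · exact pv_core _ _
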